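-- pv_equiv track=rewrite | github.com/marcwadehan-png/sophon | reasoning-mind/geodesic_reasoning_engine.py | _identify_key_nodes
-- ===== SOURCE A (Python) =====
-- from typing import Dict, List, Tuple, Optional, Callable, Any
--
-- def _identify_key_nodes(steps: List[Dict]) -> set:
--     """recognize关键节点"""
--     key_nodes = {0, len(steps) - 1}  # 始终保留首尾
--
--     # recognize转折点
--     for i in range(1, len(steps) - 1):
--         prev_type = steps[i-1].get("type", "unknown")
--         curr_type = steps[i].get("type", "unknown")
--         next_type = steps[i+1].get("type", "unknown")
--
--         # 如果类型变化,是关键节点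
--         if curr_type != prev_type or curr_type != next_type:
--             key_nodes.add(i)
--
--     return key_nodes
-- ===== SOURCE B (Python) =====
-- def _identify_key_nodes(steps):
--     """Identify key nodes by grouping consecutive steps of equal type into
--     maximal runs; every run boundary (first/last index of a run) is a key
--     node, plus the always-kept endpoints {0, len(steps)-1}."""
--     types = [s.get("type", "unknown") for s in steps]
--     n = len(types)
--     key_nodes = {0, n - 1}
--     i = 0
--     while i < n:
--         j = i
--         while j + 1 < n and types[j + 1] == types[i]:
--             j += 1
--         key_nodes.add(i)          # first index of the run
--         if j > i:
--             key_nodes.add(j)      # last index of the run (distinct)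
--         i = j + 1
--     return key_nodes
-- ===== Notes on version B (the rewrite author's own statement) =====
-- stated objective: alternative
-- what changed: B first extracts each step's type once, then groups consecutive equal types into maximal runs with a two-level while loop and adds each run's first and last index to the seed {0, len(steps)-1}, instead of A's per-index three-neighbour comparison.
import Mathlib
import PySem

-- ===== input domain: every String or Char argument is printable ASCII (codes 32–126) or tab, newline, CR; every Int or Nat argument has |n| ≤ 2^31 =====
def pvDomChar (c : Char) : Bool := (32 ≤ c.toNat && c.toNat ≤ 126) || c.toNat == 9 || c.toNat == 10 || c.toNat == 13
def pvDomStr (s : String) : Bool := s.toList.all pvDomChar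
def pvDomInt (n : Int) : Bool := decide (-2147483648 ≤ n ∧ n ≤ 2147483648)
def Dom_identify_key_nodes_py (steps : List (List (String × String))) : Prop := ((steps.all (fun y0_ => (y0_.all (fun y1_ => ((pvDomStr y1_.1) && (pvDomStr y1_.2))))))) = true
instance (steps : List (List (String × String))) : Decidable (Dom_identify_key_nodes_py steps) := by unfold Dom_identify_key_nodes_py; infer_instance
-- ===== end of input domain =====

-- B regroups the scan as explicit maximal runs of equal types (one type
-- extraction per step) instead of A's per-index three-neighbour comparison;
-- objective: alternative decomposition (same complexity).

-- shared helper: steps[j].get("type", "unknown")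
def pvTypeOf (d : List (String × String)) : String :=
  PySem.Dict.getD (PySem.Dict.ofList d) "type" "unknown"

-- ===== PORT A =====
def identify_key_nodes_py (steps : List (List (String × String))) : List Int :=
  let key : PySem.Set Int := PySem.Set.ofList [0, (steps.length : Int) - 1]
  (PySem.List.pyRange 1 ((steps.length : Int) - 1) 1).foldl
    (fun key i =>
      let prev_type := pvTypeOf (PySem.List.pyGetD steps (i - 1) [])
      let curr_type := pvTypeOf (PySem.List.pyGetD steps i [])
      let next_type := pvTypeOf (PySem.List.pyGetD steps (i + 1) [])
      if curr_type ≠ prev_type ∨ curr_type ≠ next_type then PySem.Set.add key i else key)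
    key

-- ===== PORT B =====
-- inner while loop: number of following entries equal to the run's type
def pvRunLen (t : String) : List String → Nat
  | [] => 0
  | x :: xs => if x == t then pvRunLen t xs + 1 else 0

-- outer while loop over maximal runs; `i` is the absolute index of `l`'s head
def pvBLoop (i : Int) (l : List String) (key : PySem.Set Int) : PySem.Set Int :=
  match l with
  | [] => key
  | t :: rest =>
    let k := pvRunLen t rest
    let key1 := PySem.Set.add key i
    let key2 := if 0 < k then PySem.Set.add key1 (i + (k : Int)) else key1
    pvBLoop (i + (k : Int) + 1) (rest.drop k) key2
termination_by l.length
decreasing_by simp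

def identify_key_nodes_py_alt (steps : List (List (String × String))) : List Int :=
  let types : List String := steps.map pvTypeOf
  let key : PySem.Set Int := PySem.Set.ofList [0, (steps.length : Int) - 1]
  pvBLoop 0 types key

-- ===== PRECONDITION & SPEC =====
def Spec_identify_key_nodes_py (steps : List (List (String × String))) (out : List Int) : Prop := out = identify_key_nodes_py_alt steps
instance (steps : List (List (String × String))) (out : List Int) : Decidable (Spec_identify_key_nodes_py steps out) := by unfold Spec_identify_key_nodes_py; infer_instance

-- ===== CLAIM (what is proved, stated in full; the proofs are below) =====
def Claim_equal_identify_key_nodes_py : Prop := ∀ (steps : List (List (String × String))), Dom_identify_key_nodes_py steps → Spec_identify_key_nodes_py steps (identify_key_nodes_py steps)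

-- ===== LEMMAS AND PROOFS =====

-- A's loop condition at index i
def pvBoundaryA (steps : List (List (String × String))) (i : Int) : Bool :=
  pvTypeOf (PySem.List.pyGetD steps i []) != pvTypeOf (PySem.List.pyGetD steps (i - 1) []) ||
  pvTypeOf (PySem.List.pyGetD steps i []) != pvTypeOf (PySem.List.pyGetD steps (i + 1) [])

-- "index j of l is the first or last index of a maximal run of equal entries"
def pvIsB (l : List String) (j : Nat) : Bool :=
  j == 0 || l[j]? != l[j - 1]? || l[j]? != l[j + 1]?

-- the indices B's loop adds, as a list
def pvRunAdds (i : Int) (l : List String) : List Int :=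
  match l with
  | [] => []
  | t :: rest =>
    let k := pvRunLen t rest
    (i :: (if 0 < k then [i + (k : Int)] else [])) ++ pvRunAdds (i + (k : Int) + 1) (rest.drop k)
termination_by l.length
decreasing_by simp

lemma pvRunLen_le (t : String) (l : List String) : pvRunLen t l ≤ l.length := by
  induction l with
  | nil => simp [pvRunLen]
  | cons x xs ih =>
    by_cases h : x == t
    · simp [pvRunLen, h]; omega
    · simp [pvRunLen, h]

lemma pvRunLen_lt (t : String) (l : List String) (m : Nat) (hm : m < pvRunLen t l) :
    l[m]? = some t := by
  induction l generalizing m with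
  | nil => simp [pvRunLen] at hm
  | cons x xs ih =>
    by_cases h : x == t
    · cases m with
      | zero => simpa using (eq_of_beq h)
      | succ m' =>
        simp [pvRunLen, h] at hm
        simpa using ih m' (by omega)
    · simp [pvRunLen, h] at hm

lemma pvRunLen_at (t : String) (l : List String) : l[pvRunLen t l]? ≠ some t := by
  induction l with
  | nil => simp [pvRunLen]
  | cons x xs ih =>
    by_cases h : x == t
    · simpa [pvRunLen, h] using ih
    · simp [pvRunLen, h]
      intro hx; exact h (by simp [hx])

-- B's loop is "update with the list of indices it adds"
lemma pvBLoop_eq_update (l : List String) (i : Int) (s : PySem.Set Int) :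
    pvBLoop i l s = PySem.Set.update s (pvRunAdds i l) := by
  fun_induction pvBLoop i l s with
  | case1 => simp [pvRunAdds, PySem.Set.update_nil]
  | case2 i sk t rest k key1 key2 ih =>
    rw [pvRunAdds, ih]
    by_cases hk : 0 < pvRunLen t rest
    · simp only [key2, key1, k, hk, if_true]
      simp [PySem.Set.update_cons]
    · simp only [key2, key1, k, hk, if_false]
      simp [PySem.Set.update_cons]

-- A's fold is "update with the filtered range"
lemma pvAFold_eq_update (steps : List (List (String × String))) (l : List Int) (s : PySem.Set Int) :
    l.foldl
      (fun key i =>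
        let prev_type := pvTypeOf (PySem.List.pyGetD steps (i - 1) [])
        let curr_type := pvTypeOf (PySem.List.pyGetD steps i [])
        let next_type := pvTypeOf (PySem.List.pyGetD steps (i + 1) [])
        if curr_type ≠ prev_type ∨ curr_type ≠ next_type then PySem.Set.add key i else key)
      s
    = PySem.Set.update s (l.filter (fun i => pvBoundaryA steps i)) := by
  induction l generalizing s with
  | nil => simp [PySem.Set.update_nil]
  | cons a l ih =>
    simp only [List.foldl_cons, List.filter_cons]
    rw [ih]
    by_cases h : pvBoundaryA steps a = true
    · have h' : pvTypeOf (PySem.List.pyGetD steps a []) ≠ pvTypeOf (PySem.List.pyGetD steps (a - 1) []) ∨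
          pvTypeOf (PySem.List.pyGetD steps a []) ≠ pvTypeOf (PySem.List.pyGetD steps (a + 1) []) := by
        simpa [pvBoundaryA] using h
      simp [h, h', PySem.Set.update_cons]
    · have h' : ¬ (pvTypeOf (PySem.List.pyGetD steps a []) ≠ pvTypeOf (PySem.List.pyGetD steps (a - 1) []) ∨
          pvTypeOf (PySem.List.pyGetD steps a []) ≠ pvTypeOf (PySem.List.pyGetD steps (a + 1) [])) := by
        simpa [pvBoundaryA] using h
      simp [h, h']

-- shifting pvIsB across the first maximal run
lemma pvIsB_shift (t : String) (rest : List String) (j' : Nat) (h : j' ≠ 0) :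
    pvIsB (rest.drop (pvRunLen t rest)) j' = pvIsB (t :: rest) (pvRunLen t rest + 1 + j') := by
  set k := pvRunLen t rest with hk
  have e0 : (rest.drop k)[j']? = rest[k + j']? := by rw [List.getElem?_drop]
  have e1 : (rest.drop k)[j' - 1]? = rest[k + j' - 1]? := by
    rw [List.getElem?_drop, show k + (j' - 1) = k + j' - 1 from by omega]
  have e2 : (rest.drop k)[j' + 1]? = rest[k + j' + 1]? := by
    rw [List.getElem?_drop, show k + (j' + 1) = k + j' + 1 from by omega]
  have f0 : (t :: rest)[k + 1 + j']? = rest[k + j']? := by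
    rw [show k + 1 + j' = (k + j') + 1 by omega, List.getElem?_cons_succ]
  have f1 : (t :: rest)[k + 1 + j' - 1]? = rest[k + j' - 1]? := by
    rw [show k + 1 + j' - 1 = (k + j' - 1) + 1 by omega, List.getElem?_cons_succ]
  have f2 : (t :: rest)[k + 1 + j' + 1]? = rest[k + j' + 1]? := by
    rw [show k + 1 + j' + 1 = (k + j' + 1) + 1 by omega, List.getElem?_cons_succ]
  simp only [pvIsB, e0, e1, e2, f0, f1, f2]
  have g1 : (j' == 0) = false := by simp [h]
  have g2 : (k + 1 + j' == 0) = false := by simp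
  rw [g1, g2]

-- the first run's prefix of l = t :: rest is all t
lemma pvRunPrefix (t : String) (rest : List String) (m : Nat) (hm : m ≤ pvRunLen t rest) :
    (t :: rest)[m]? = some t := by
  cases m with
  | zero => rfl
  | succ m' => simpa using pvRunLen_lt t rest m' (by omega)

-- membership in pvRunAdds = run boundaries
lemma mem_pvRunAdds (l : List String) (i y : Int) :
    y ∈ pvRunAdds i l ↔ ∃ j : Nat, j < l.length ∧ y = i + j ∧ pvIsB l j = true := by
  fun_induction pvRunAdds i l with
  | case1 => simp
  | case2 i t rest k ih =>
    have hk_le : pvRunLen t rest ≤ rest.length := pvRunLen_le t rest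
    have hat : rest[pvRunLen t rest]? ≠ some t := pvRunLen_at t rest
    have hcons : (t :: rest)[pvRunLen t rest + 1]? = rest[pvRunLen t rest]? := by simp
    constructor
    · intro hy
      rcases List.mem_append.1 hy with h1 | h2
      · rcases List.mem_cons.1 h1 with rfl | h1'
        · exact ⟨0, by simp, by simp, by simp [pvIsB]⟩
        · have hkpos : 0 < pvRunLen t rest := by
            by_contra hc
            simp [k, hc] at h1'
          have hy' : y = i + (pvRunLen t rest : Int) := by
            simp [k, hkpos] at h1'; exact h1'
          refine ⟨pvRunLen t rest, by simp only [List.length_cons]; omega, hy', ?_⟩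
          simp only [pvIsB, Bool.or_eq_true, bne_iff_ne, beq_iff_eq]
          right
          rw [pvRunPrefix t rest _ le_rfl, hcons]
          exact fun hc => hat hc.symm
      · obtain ⟨j', hj'len, hy', hB⟩ := ih.1 h2
        rw [List.length_drop] at hj'len
        refine ⟨pvRunLen t rest + 1 + j', by simp only [List.length_cons]; omega, by omega, ?_⟩
        by_cases hj0 : j' = 0
        · subst hj0
          simp only [Nat.add_zero, pvIsB, Bool.or_eq_true, bne_iff_ne, beq_iff_eq]
          left; right
          rw [Nat.add_sub_cancel, hcons, pvRunPrefix t rest _ le_rfl]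
          exact hat
        · rw [← pvIsB_shift t rest j' hj0]
          exact hB
    · rintro ⟨j, hjlen, rfl, hB⟩
      simp only [List.length_cons] at hjlen
      rcases Nat.lt_or_ge j (pvRunLen t rest + 1) with hj | hj
      · by_cases hj0 : j = 0
        · subst hj0; simp
        · have ej : (t :: rest)[j]? = some t := pvRunPrefix t rest j (by omega)
          have ejm : (t :: rest)[j - 1]? = some t := pvRunPrefix t rest (j - 1) (by omega)
          have hjk : j = pvRunLen t rest := by
            by_contra hne
            have ejp : (t :: rest)[j + 1]? = some t := pvRunPrefix t rest (j + 1) (by omega)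
            simp [pvIsB, hj0, ej, ejm, ejp] at hB
          subst hjk
          have hkpos : 0 < pvRunLen t rest := by omega
          apply List.mem_append.2
          left
          simp [k, hkpos]
      · apply List.mem_append.2
        right
        rw [ih]
        refine ⟨j - (pvRunLen t rest + 1), by rw [List.length_drop]; omega, by omega, ?_⟩
        by_cases hj0 : j - (pvRunLen t rest + 1) = 0
        · simp [pvIsB, hj0]
        · rw [pvIsB_shift t rest _ hj0,
            show pvRunLen t rest + 1 + (j - (pvRunLen t rest + 1)) = j from by omega]
          exact hB

-- bounds and strict sortedness of pvRunAdds
lemma pvRunAdds_sorted (l : List String) (i : Int) :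
    (∀ y ∈ pvRunAdds i l, i ≤ y ∧ y < i + l.length) ∧ (pvRunAdds i l).Pairwise (· < ·) := by
  fun_induction pvRunAdds i l with
  | case1 => simp
  | case2 i t rest k ih =>
    have hk_le : pvRunLen t rest ≤ rest.length := pvRunLen_le t rest
    obtain ⟨ihb, ihp⟩ := ih
    rw [List.length_drop] at ihb
    constructor
    · intro y hy
      rcases List.mem_append.1 hy with h1 | h2
      · rcases List.mem_cons.1 h1 with rfl | h1'
        · simp only [List.length_cons]
          constructor
          · omega
          · omega
        · by_cases hkpos : 0 < pvRunLen t rest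
          · simp only [k, hkpos, if_true, List.mem_singleton] at h1'
            subst h1'
            simp only [List.length_cons]
            constructor
            · omega
            · omega
          · simp [k, hkpos] at h1'
      · have hb := ihb y h2
        simp only [List.length_cons]
        constructor
        · omega
        · omega
    · rw [List.pairwise_append]
      refine ⟨?_, ihp, ?_⟩
      · by_cases hkpos : 0 < pvRunLen t rest
        · simp only [k, hkpos, if_true]
          simp
          omega
        · simp [k, hkpos]
      · intro a ha b hb
        have hbb := (ihb b hb).1
        rcases List.mem_cons.1 ha with rfl | ha'
        · omega
        · by_cases hkpos : 0 < pvRunLen t rest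
          · simp only [k, hkpos, if_true, List.mem_singleton] at ha'
            subst ha'
            omega
          · simp [k, hkpos] at ha'

-- A's index condition equals the run-boundary condition on the type list
lemma pvBridge (steps : List (List (String × String))) (j : Nat)
    (h1 : 1 ≤ j) (h2 : j + 1 < steps.length) :
    pvBoundaryA steps (j : Int) = pvIsB (steps.map pvTypeOf) j := by
  have hj : j < steps.length := by omega
  have hjm : j - 1 < steps.length := by omega
  have e0 : PySem.List.pyGetD steps (j : Int) [] = steps[j] := by
    rw [PySem.List.pyGetD_natCast, List.getD_eq_getElem?_getD, List.getElem?_eq_getElem hj,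
      Option.getD_some]
  have em : PySem.List.pyGetD steps ((j : Int) - 1) [] = steps[j - 1] := by
    rw [show (j : Int) - 1 = ((j - 1 : Nat) : Int) from by omega, PySem.List.pyGetD_natCast,
      List.getD_eq_getElem?_getD, List.getElem?_eq_getElem hjm, Option.getD_some]
  have ep : PySem.List.pyGetD steps ((j : Int) + 1) [] = steps[j + 1] := by
    rw [show (j : Int) + 1 = ((j + 1 : Nat) : Int) from by omega, PySem.List.pyGetD_natCast,
      List.getD_eq_getElem?_getD, List.getElem?_eq_getElem h2, Option.getD_some]
  have m0 : (steps.map pvTypeOf)[j]? = some (pvTypeOf steps[j]) := by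
    simp [List.getElem?_eq_getElem hj]
  have mm : (steps.map pvTypeOf)[j - 1]? = some (pvTypeOf steps[j - 1]) := by
    simp [List.getElem?_eq_getElem hjm]
  have mp : (steps.map pvTypeOf)[j + 1]? = some (pvTypeOf steps[j + 1]) := by
    simp [List.getElem?_eq_getElem h2]
  have hj0 : ¬ (j = 0) := by omega
  rw [Bool.eq_iff_iff]
  simp only [pvBoundaryA, pvIsB, e0, em, ep, m0, mm, mp, Bool.or_eq_true, bne_iff_ne,
    beq_iff_eq, ne_eq, Option.some.injEq]
  tauto

-- the main case: at least two steps
lemma pvMain (steps : List (List (String × String))) (h2 : 2 ≤ steps.length) :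
    PySem.Set.update (PySem.Set.ofList [0, (steps.length : Int) - 1])
      ((PySem.List.pyRange 1 ((steps.length : Int) - 1) 1).filter (fun i => pvBoundaryA steps i))
    = PySem.Set.update (PySem.Set.ofList [0, (steps.length : Int) - 1])
      (pvRunAdds 0 (steps.map pvTypeOf)) := by
  have hlen : (steps.map pvTypeOf).length = steps.length := by simp
  set nI : Int := (steps.length : Int) - 1 with hnI
  have hs0 : PySem.Set.ofList [0, nI] = [0, nI] := by
    have h01 : (0 : Int) ≠ nI := by omega
    exact PySem.Set.ofList_eq_self_of_nodup _
      (List.nodup_cons.mpr ⟨by simp [h01], List.nodup_singleton _⟩)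
  rw [hs0, PySem.Set.update_eq_append_filter, PySem.Set.update_eq_append_filter]
  congr 1
  set Af := (PySem.List.pyRange 1 nI 1).filter (fun i => pvBoundaryA steps i) with hAf
  set Bf := pvRunAdds 0 (steps.map pvTypeOf) with hBf
  have hAnodup : Af.Nodup := (PySem.List.nodup_pyRange_one 1 nI).filter _
  have hBsorted := pvRunAdds_sorted (steps.map pvTypeOf) 0
  have hBnodup : Bf.Nodup := hBsorted.2.imp fun h => ne_of_lt h
  rw [PySem.Set.ofList_eq_self_of_nodup _ hAnodup, PySem.Set.ofList_eq_self_of_nodup _ hBnodup]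
  have hq : ∀ y : Int, ((!PySem.Set.contains [0, nI] y) = true) ↔ (¬ y = 0 ∧ ¬ y = nI) := by
    intro y
    simp [PySem.Set.contains_eq_listContains]
  have hAf_mem : ∀ y : Int, y ∈ Af ↔ ((1 ≤ y ∧ y < nI) ∧ pvBoundaryA steps y = true) := by
    intro y
    rw [hAf, List.mem_filter, PySem.List.mem_pyRange_one]
  have hAq : Af.filter (fun y => !PySem.Set.contains [0, nI] y) = Af := by
    apply List.filter_eq_self.mpr
    intro y hy
    have hb := (hAf_mem y).1 hy
    exact (hq y).2 ⟨by omega, by omega⟩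
  rw [hAq]
  have hAsorted : Af.Pairwise (· < ·) := (PySem.List.pairwise_lt_pyRange_one 1 nI).filter _
  have hBfq : (Bf.filter (fun y => !PySem.Set.contains [0, nI] y)).Pairwise (· < ·) :=
    hBsorted.2.filter _
  have hBfqnodup : (Bf.filter (fun y => !PySem.Set.contains [0, nI] y)).Nodup := hBnodup.filter _
  have hmem : ∀ y : Int, y ∈ Af ↔ y ∈ Bf.filter (fun y => !PySem.Set.contains [0, nI] y) := by
    intro y
    rw [hAf_mem, List.mem_filter, hBf, mem_pvRunAdds]
    constructor
    · rintro ⟨⟨hy1, hy2⟩, hb⟩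
      have hj1 : 1 ≤ y.toNat := by omega
      have hj2 : y.toNat + 1 < steps.length := by omega
      refine ⟨⟨y.toNat, by omega, by omega, ?_⟩, ?_⟩
      · rw [← pvBridge steps y.toNat hj1 hj2, show ((y.toNat : Nat) : Int) = y from by omega]
        exact hb
      · exact (hq y).2 ⟨by omega, by omega⟩
    · rintro ⟨⟨j, hjlen, rfl, hB⟩, hqy⟩
      rw [hlen] at hjlen
      have h0 := (hq _).1 hqy
      have hj1 : 1 ≤ j := by omega
      have hj2 : j + 1 < steps.length := by omega
      refine ⟨⟨by omega, by omega⟩, ?_⟩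
      rw [show (0 : Int) + (j : Int) = (j : Int) from by omega, pvBridge steps j hj1 hj2]
      exact hB
  have hperm := (List.perm_ext_iff_of_nodup hAnodup hBfqnodup).mpr hmem
  exact hperm.eq_of_pairwise (fun a b _ _ hab hba => absurd hba (not_lt.mpr hab.le))
    hAsorted hBfq

-- ===== VERDICT (by name: the statement is the Claim_ definition above) =====
theorem identify_key_nodes_py_spec : Claim_equal_identify_key_nodes_py := by
  unfold Claim_equal_identify_key_nodes_py
  intro steps _
  unfold Spec_identify_key_nodes_py identify_key_nodes_py identify_key_nodes_py_alt
  rw [pvAFold_eq_update, pvBLoop_eq_update]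
  rcases steps with _ | ⟨d, _ | ⟨d2, rest⟩⟩
  · simp only [List.length_nil, Nat.cast_zero, List.map_nil]
    rw [PySem.List.pyRange_one_eq_nil (by norm_num)]
    simp [pvRunAdds, PySem.Set.update_nil]
  · simp only [List.length_cons, List.length_nil, List.map_cons, List.map_nil]
    rw [PySem.List.pyRange_one_eq_nil (by norm_num)]
    simp [pvRunAdds, pvRunLen, PySem.Set.update, PySem.Set.ofList, PySem.Set.add,
      PySem.Set.contains]
  · exact pvMain _ (by simp)
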